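-- pv_equiv track=rewrite | github.com/inaciomdrs/sirna_db_building_protocol | bin/OligoCalc.py | CheckBase
-- ===== SOURCE A (Python) =====
-- def RemoveNonPrintingChars(theString):
--     return theString.replace(' ', '')
--
-- def IsIUpacBase(theBase):
--     return theBase in "MRWSYKVHDBN"
--
-- def IsBase(theBase):
--     return theBase in 'ATCGU'
--
-- def CheckBase(theString):
--     returnString = ""
--     cnt = 0
--     # rcnt = 0
--     cha = ""
--     theString = theString.upper()
--     theString = RemoveNonPrintingChars(theString)
--
--     for cha in theString:
--         if IsIUpacBase(cha) or IsBase(cha):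
--             returnString += cha
--             cnt += 1
--         elif cha != " " and cha != "\n":
--             raise ValueError(f" base {cnt+1}: {cha} is not a valid base!")
--
--     return returnString
-- ===== SOURCE B (Python) =====
-- def CheckBase(theString):
--     cleaned = theString.upper().replace(' ', '')
--     valid = set('ATCGUMRWSYKVHDBN')
--     for p, ch in enumerate(cleaned):
--         if ch not in valid and ch != '\n':
--             cnt = sum(1 for c in cleaned[:p] if c in valid)
--             raise ValueError(f" base {cnt+1}: {ch} is not a valid base!")
--     return ''.join(c for c in cleaned if c in valid)
-- ===== Notes on version B (the rewrite author's own statement) =====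
-- stated objective: alternative
-- what changed: A's single interleaved validate-and-build loop with a running string/counter is replaced by two separate passes over the cleaned string: a validation scan that locates the first invalid character (recomputing the base count only in the error case) and an independent membership filter that builds the result.
import Mathlib
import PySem

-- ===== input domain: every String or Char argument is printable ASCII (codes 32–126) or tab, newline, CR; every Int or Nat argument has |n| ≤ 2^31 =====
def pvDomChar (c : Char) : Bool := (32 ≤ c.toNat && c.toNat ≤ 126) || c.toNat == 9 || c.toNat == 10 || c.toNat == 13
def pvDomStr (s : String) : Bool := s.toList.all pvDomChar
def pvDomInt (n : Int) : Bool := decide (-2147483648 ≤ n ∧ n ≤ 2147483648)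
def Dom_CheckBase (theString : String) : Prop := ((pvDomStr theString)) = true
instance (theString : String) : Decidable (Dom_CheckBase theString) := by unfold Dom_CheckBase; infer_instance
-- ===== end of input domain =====

-- B replaces A's single interleaved validate-and-build loop by a validation scan plus an
-- independent membership filter (alternative decomposition, same cost). Where A raises
-- ValueError (invalid character), B raises too; those inputs are outside Pre_.

-- ===== PORT A =====
-- Python: 'theBase in "MRWSYKVHDBN"' on a single char is exactly membership — exact.
def pvIsIUpacBase (theBase : Char) : Bool := "MRWSYKVHDBN".toList.contains theBase

def pvIsBase (theBase : Char) : Bool := "ATCGU".toList.contains theBase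

-- A's loop: state (returnString, cnt); 'none' models the ValueError on an invalid char.
def pvCheckLoop : List Char → List Char → Int → Option (List Char)
  | [], acc, _ => some acc
  | cha :: rest, acc, cnt =>
    if pvIsIUpacBase cha || pvIsBase cha then pvCheckLoop rest (acc ++ [cha]) (cnt + 1)
    else if cha ≠ ' ' ∧ cha ≠ '\n' then none
    else pvCheckLoop rest acc cnt

def CheckBase (theString : String) : String :=
  let s := PySem.Chars.replace (PySem.Chars.upper theString.toList) [' '] []
  match pvCheckLoop s [] 0 with
  | some l => String.ofList l
  | none => ""   -- Python raises ValueError here; excluded by Pre_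

-- ===== PORT B =====
def pvValidBase (c : Char) : Bool := "ATCGUMRWSYKVHDBN".toList.contains c

def CheckBase_alt (theString : String) : String :=
  let cleaned := PySem.Chars.replace (PySem.Chars.upper theString.toList) [' '] []
  match cleaned.find? (fun ch => !pvValidBase ch && ch ≠ '\n') with
  | some _ => ""   -- Source B raises ValueError here; excluded by Pre_
  | none => String.ofList (cleaned.filter pvValidBase)

-- ===== PRECONDITION & SPEC =====
-- Pre_ excludes exactly the inputs on which A (and B) raise ValueError: a character of the
-- uppercased, space-stripped string that is neither a valid IUPAC/DNA base nor a newline.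
def Pre_CheckBase (theString : String) : Prop :=
  (PySem.Chars.replace (PySem.Chars.upper theString.toList) [' '] []).all
    (fun c => "ATCGUMRWSYKVHDBN".toList.contains c || c == '\n') = true
instance (theString : String) : Decidable (Pre_CheckBase theString) := by
  unfold Pre_CheckBase; infer_instance

def pvWitness_CheckBase : String := "at cg\nU n"

def Spec_CheckBase (theString : String) (out : String) : Prop := out = CheckBase_alt theString
instance (theString : String) (out : String) : Decidable (Spec_CheckBase theString out) := by
  unfold Spec_CheckBase; infer_instance

-- ===== CLAIM (what is proved, stated in full; the proofs are below) =====
def Claim_equal_CheckBase : Prop := ∀ (theString : String), Dom_CheckBase theString → Pre_CheckBase theString → Spec_CheckBase theString (CheckBase theString)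

-- ===== LEMMAS AND PROOFS =====

lemma pvValid_eq (c : Char) : (pvIsIUpacBase c || pvIsBase c) = pvValidBase c := by
  rw [Bool.eq_iff_iff]
  simp [pvIsIUpacBase, pvIsBase, pvValidBase, List.contains_eq_mem]
  tauto

lemma pvCheckLoop_eq (l acc : List Char) (cnt : Int)
    (h : ∀ c ∈ l, pvValidBase c || c == '\n') :
    pvCheckLoop l acc cnt = some (acc ++ l.filter pvValidBase) := by
  induction l generalizing acc cnt with
  | nil => simp [pvCheckLoop]
  | cons c rest ih =>
    have hc := h c (by simp)
    have hr : ∀ x ∈ rest, pvValidBase x || x == '\n' := fun x hx => h x (by simp [hx])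
    rw [pvCheckLoop, pvValid_eq]
    by_cases hv : pvValidBase c = true
    · simp [hv, ih _ _ hr]
    · have hn : c = '\n' := by
        rcases Bool.or_eq_true_iff.mp hc with h1 | h1
        · exact absurd h1 hv
        · exact beq_iff_eq.mp h1
      simp [hn, show pvValidBase '\n' = false from rfl, ih _ _ hr]

-- ===== VERDICT (by name: the statement is the Claim_ definition above) =====
theorem CheckBase_spec : Claim_equal_CheckBase := by
  intro s _ hpre
  unfold Pre_CheckBase at hpre
  unfold Spec_CheckBase CheckBase CheckBase_alt
  dsimp only
  generalize PySem.Chars.replace (PySem.Chars.upper s.toList) [' '] [] = cl at hpre ⊢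
  have hall : ∀ c ∈ cl, pvValidBase c || c == '\n' := by
    intro c hc
    have := (List.all_eq_true.mp hpre) c hc
    simpa [pvValidBase] using this
  have hfind : cl.find? (fun ch => !pvValidBase ch && ch ≠ '\n') = none := by
    rw [List.find?_eq_none]
    intro c hc
    have := hall c hc
    simp only [Bool.or_eq_true, beq_iff_eq] at this
    rcases this with h1 | h1 <;> simp [h1]
  rw [pvCheckLoop_eq cl [] 0 hall, hfind]
  simp
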